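-- pv_equiv track=rewrite | github.com/sbula/specweaver | src/specweaver/workspace/parsers/kotlin/codestructure.py | _auto_indent
-- ===== SOURCE A (Python) =====
-- def _auto_indent(new_code: str, margin: int) -> str:
--     if not new_code:
--         return new_code
--     lines = new_code.split("\n")
--     padded = []
--     for i, line in enumerate(lines):
--         if i == 0:
--             padded.append(line)
--         else:
--             if line.strip() == "":
--                 padded.append(line)
--             else:
--                 padded.append((" " * margin) + line)
--     return "\n".join(padded)
-- ===== SOURCE B (Python) =====
-- def _auto_indent(new_code: str, margin: int) -> str:
--     # Single backward character scan: no split into a list of lines, no join.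
--     # While scanning right-to-left we know whether the line after each '\n'
--     # contains a non-whitespace character, so the margin is inserted on the fly.
--     out = []  # characters of the result, in reverse order
--     nonblank = False  # does the line to the right of the cursor contain non-whitespace?
--     for ch in reversed(new_code):
--         if ch == "\n":
--             if nonblank:
--                 out.extend(" " * margin)
--             out.append("\n")
--             nonblank = False
--         else:
--             out.append(ch)
--             if not ch.isspace():
--                 nonblank = True
--     return "".join(reversed(out))
-- ===== Notes on version B (the rewrite author's own statement) =====
-- stated objective: alternative
-- what changed: Replaces split-into-lines / enumerate loop / join with a single backward character scan that tracks whether the line to the right contains non-whitespace and inserts the margin at each qualifying newline on the fly, never materializing a list of lines.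
import Mathlib
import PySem

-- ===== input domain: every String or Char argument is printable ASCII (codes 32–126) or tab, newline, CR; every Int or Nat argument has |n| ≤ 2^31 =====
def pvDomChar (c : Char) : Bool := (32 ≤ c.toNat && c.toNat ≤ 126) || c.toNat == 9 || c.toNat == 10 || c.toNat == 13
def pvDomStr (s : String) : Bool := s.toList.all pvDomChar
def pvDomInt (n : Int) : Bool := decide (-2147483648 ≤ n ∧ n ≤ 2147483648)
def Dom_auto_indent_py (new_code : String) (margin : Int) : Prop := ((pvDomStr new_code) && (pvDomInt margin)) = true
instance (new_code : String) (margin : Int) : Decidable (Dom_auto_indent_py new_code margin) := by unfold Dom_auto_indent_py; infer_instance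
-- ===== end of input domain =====

-- B replaces A's split/loop/join over a list of lines by one backward character scan
-- inserting the margin at each newline whose following line is non-blank (objective: alternative).

-- ===== PORT A =====
-- Python: lines = new_code.split("\n"); loop over enumerate(lines) appending; "\n".join(padded).
-- sep "\n" is a non-empty literal, so split("\n") is PySem.Chars.splitOn.
def auto_indent_py (new_code : String) (margin : Int) : String :=
  if new_code == "" then new_code
  else
    let lines := PySem.Chars.splitOn new_code.toList ['\n']
    let padded := (PySem.List.enumerate lines 0).foldl (fun acc p =>
      if p.1 == 0 then acc ++ [p.2]
      else if PySem.Chars.strip p.2 == ([] : List Char) then acc ++ [p.2]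
      else acc ++ [PySem.List.pyRepeat [' '] margin ++ p.2]) []
    String.ofList (PySem.Chars.join ['\n'] padded)

-- ===== PORT B =====
-- Python B builds the result characters in reverse order (list `out`, reversed at the end);
-- here the state's first component IS that list already reversed, so `out.append(c)` is
-- `c :: st.1`, `out.extend(pad)` is `pad.reverse ++ st.1`, and the final reverse disappears.
def auto_indent_py_alt (new_code : String) (margin : Int) : String :=
  let res := new_code.toList.reverse.foldl (fun (st : List Char × Bool) c =>
      if c == '\n' then
        ('\n' :: (if st.2 then (PySem.List.pyRepeat [' '] margin).reverse ++ st.1 else st.1), false)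
      else
        (c :: st.1, st.2 || !(PySem.Chars.isspace c))) ([], false)
  String.ofList res.1

-- ===== PRECONDITION & SPEC =====
def Spec_auto_indent_py (new_code : String) (margin : Int) (out : String) : Prop := out = auto_indent_py_alt new_code margin
instance (new_code : String) (margin : Int) (out : String) : Decidable (Spec_auto_indent_py new_code margin out) := by unfold Spec_auto_indent_py; infer_instance

-- ===== CLAIM (what is proved, stated in full; the proofs are below) =====
def Claim_equal_auto_indent_py : Prop := ∀ (new_code : String) (margin : Int), Dom_auto_indent_py new_code margin → Spec_auto_indent_py new_code margin (auto_indent_py new_code margin)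

-- ===== LEMMAS AND PROOFS =====

/-- Specification-side splitting of a character list at newlines. -/
def pvSplitNL : List Char → List (List Char)
  | [] => [[]]
  | c :: rest => if c = '\n' then [] :: pvSplitNL rest else (pvSplitNL rest).modifyHead (c :: ·)

theorem pvSplitNL_ne_nil (l : List Char) : pvSplitNL l ≠ [] := by
  induction l with
  | nil => simp [pvSplitNL]
  | cons c rest ih =>
    simp only [pvSplitNL]
    split_ifs
    · simp
    · cases h : pvSplitNL rest with
      | nil => exact absurd h ih
      | cons a t => simp

theorem pvSplitNL_cons_nl (rest : List Char) :
    pvSplitNL ('\n' :: rest) = [] :: pvSplitNL rest := by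
  simp [pvSplitNL]

theorem pvSplitNL_cons_ne (c : Char) (rest : List Char) (hc : c ≠ '\n') :
    pvSplitNL (c :: rest) = (pvSplitNL rest).modifyHead (c :: ·) := by
  simp [pvSplitNL, hc]

theorem pv_go_eq (l : List Char) : ∀ (fuel : Nat) (cur : List Char) (acc : List (List Char)),
    l.length < fuel →
    PySem.Chars.splitOn.go ['\n'] fuel l cur acc
      = acc.reverse ++ (pvSplitNL l).modifyHead (cur.reverse ++ ·) := by
  induction l with
  | nil =>
    intro fuel cur acc h
    cases fuel with
    | zero => omega
    | succ n => simp [PySem.Chars.splitOn.go, pvSplitNL]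
  | cons c rest ih =>
    intro fuel cur acc h
    cases fuel with
    | zero => simp at h
    | succ n =>
      rw [PySem.Chars.splitOn.go]
      by_cases hc : c = '\n'
      · subst hc
        have hpre : List.isPrefixOf ['\n'] ('\n' :: rest) = true := by
          simp [List.isPrefixOf]
        simp only [hpre, if_pos]
        rw [show List.drop (['\n'].length) ('\n' :: rest) = rest from rfl]
        rw [ih n [] (cur.reverse :: acc) (by simpa using h)]
        simp [pvSplitNL]
        cases pvSplitNL rest <;> simp
      · have hpre : List.isPrefixOf ['\n'] (c :: rest) = false := by
          simp [List.isPrefixOf]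
          exact fun hh => hc hh.symm
        simp only [hpre]
        rw [if_neg (by simp)]
        rw [ih n (c :: cur) acc (by simpa using h)]
        simp only [pvSplitNL, if_neg hc]
        cases hsp : pvSplitNL rest with
        | nil => exact absurd hsp (pvSplitNL_ne_nil rest)
        | cons a t => simp

theorem pv_splitOn_eq (l : List Char) : PySem.Chars.splitOn l ['\n'] = pvSplitNL l := by
  rw [PySem.Chars.splitOn, pv_go_eq l (l.length + 1) [] [] (by omega)]
  cases h : pvSplitNL l with
  | nil => exact absurd h (pvSplitNL_ne_nil l)
  | cons a t => simp

theorem pv_strip_eq_nil_iff (l : List Char) :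
    PySem.Chars.strip l = [] ↔ ∀ c ∈ l, PySem.Chars.isspace c = true := by
  constructor
  · intro h c hc
    by_contra hns
    have h2 : c ∈ PySem.Chars.lstrip l := by
      unfold PySem.Chars.lstrip
      have := List.takeWhile_append_dropWhile (p := PySem.Chars.isspace) (l := l)
      rcases List.mem_append.mp (by rw [this]; exact hc) with h' | h'
      · exact absurd (List.mem_takeWhile_imp h') hns
      · exact h'
    have h3 : c ∈ PySem.Chars.rstrip (PySem.Chars.lstrip l) := by
      unfold PySem.Chars.rstrip
      rw [List.mem_reverse]
      have := List.takeWhile_append_dropWhile (p := PySem.Chars.isspace)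
        (l := (PySem.Chars.lstrip l).reverse)
      rcases List.mem_append.mp (by rw [this]; rw [List.mem_reverse]; exact h2) with h' | h'
      · exact absurd (List.mem_takeWhile_imp h') hns
      · exact h'
    rw [PySem.Chars.strip] at h
    rw [h] at h3
    simp at h3
  · intro h
    have : PySem.Chars.lstrip l = [] := by
      unfold PySem.Chars.lstrip
      rw [List.dropWhile_eq_nil_iff]
      intro a ha; exact h a ha
    rw [PySem.Chars.strip, this]
    rfl

/-- How A pads every line after the first. -/
def pvPadLine (pad l : List Char) : List Char :=
  if l.all PySem.Chars.isspace then l else pad ++ l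

/-- The common result: first line untouched, later lines padded when non-blank. -/
def pvRend (pad : List Char) (ls : List (List Char)) : List Char :=
  ls.headI ++ ls.tail.flatMap (fun l => '\n' :: pvPadLine pad l)

theorem pv_join_eq (h : List Char) (t : List (List Char)) (pad : List Char) :
    PySem.Chars.join ['\n'] (h :: t.map (pvPadLine pad)) = pvRend pad (h :: t) := by
  induction t generalizing h with
  | nil => simp [PySem.Chars.join_singleton, pvRend]
  | cons x t ih =>
    rw [List.map_cons, PySem.Chars.join_cons_cons, ih (pvPadLine pad x)]
    simp [pvRend]

theorem pv_enum_map (t : List (List Char)) (pad : List Char) : ∀ s : Int, 1 ≤ s →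
    (PySem.List.enumerate t s).map (fun p =>
        if p.1 == 0 then p.2
        else if PySem.Chars.strip p.2 == ([] : List Char) then p.2
        else pad ++ p.2)
      = t.map (pvPadLine pad) := by
  induction t with
  | nil => intro s _; simp [PySem.List.enumerate]
  | cons x t ih =>
    intro s hs
    rw [PySem.List.enumerate_cons, List.map_cons, List.map_cons, ih (s + 1) (by omega)]
    congr 1
    have hsz : (s == 0) = false := by simp; omega
    rw [hsz]
    simp only [Bool.false_eq_true, if_false, pvPadLine]
    by_cases hb : x.all PySem.Chars.isspace
    · have : PySem.Chars.strip x = [] := (pv_strip_eq_nil_iff x).mpr (by simpa [List.all_eq_true] using hb)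
      simp [this, hb]
    · have : PySem.Chars.strip x ≠ [] := by
        intro h
        exact hb (by simpa [List.all_eq_true] using (pv_strip_eq_nil_iff x).mp h)
      simp [this, hb]

/-- B's backward scan, seen as a foldr, computes `pvRend` of the newline split,
    together with the blank-test flag of the first line. -/
theorem pv_scan_eq (pad : List Char) (cs : List Char) :
    cs.foldr (fun c (st : List Char × Bool) =>
        if c == '\n' then
          ('\n' :: (if st.2 then pad.reverse ++ st.1 else st.1), false)
        else
          (c :: st.1, st.2 || !(PySem.Chars.isspace c))) ([], false)
      = (pvRend pad.reverse (pvSplitNL cs),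
         (pvSplitNL cs).headI.any (fun c => !(PySem.Chars.isspace c))) := by
  induction cs with
  | nil => simp [pvSplitNL, pvRend]
  | cons c rest ih =>
    rw [List.foldr_cons, ih]
    by_cases hc : c = '\n'
    · subst hc
      simp only [beq_self_eq_true, if_pos]
      cases hsp : pvSplitNL rest with
      | nil => exact absurd hsp (pvSplitNL_ne_nil rest)
      | cons h t =>
        rw [pvSplitNL_cons_nl, hsp]
        simp only [List.headI_cons]
        rw [Prod.mk.injEq]
        refine ⟨?_, by simp⟩
        rw [show pvRend pad.reverse ([] :: h :: t)
              = '\n' :: (pvPadLine pad.reverse h ++ t.flatMap (fun l => '\n' :: pvPadLine pad.reverse l))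
            from by simp [pvRend]]
        rw [show pvRend pad.reverse (h :: t)
              = h ++ t.flatMap (fun l => '\n' :: pvPadLine pad.reverse l)
            from by simp [pvRend]]
        by_cases hb : (h.any fun c => !PySem.Chars.isspace c) = true
        · have hall : h.all PySem.Chars.isspace = false := by
            rcases List.any_eq_true.mp hb with ⟨a, ha, hna⟩
            exact List.all_eq_false.mpr ⟨a, ha, by simpa using hna⟩
          rw [if_pos hb]
          rw [show pvPadLine pad.reverse h = pad.reverse ++ h from by simp [pvPadLine, hall]]
          simp
        · have hall : h.all PySem.Chars.isspace = true := by
            simp only [List.all_eq_true]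
            intro a ha
            by_contra hna
            exact hb (List.any_eq_true.mpr ⟨a, ha, by simp [hna]⟩)
          rw [if_neg hb]
          rw [show pvPadLine pad.reverse h = h from by simp [pvPadLine, hall]]
    · have hbeq : (c == '\n') = false := by simp [hc]
      rw [hbeq]
      simp only [Bool.false_eq_true, if_false]
      rw [pvSplitNL_cons_ne c rest hc]
      cases hsp : pvSplitNL rest with
      | nil => exact absurd hsp (pvSplitNL_ne_nil rest)
      | cons h t =>
        simp only [List.modifyHead, pvRend, List.headI, List.tail]
        rw [Prod.mk.injEq]
        exact ⟨by simp, by simp [Bool.or_comm]⟩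

/-- A on a non-empty character list computes `pvRend`. -/
theorem pv_A_eq (cs : List Char) (margin : Int) :
    (PySem.Chars.join ['\n']
      ((PySem.List.enumerate (PySem.Chars.splitOn cs ['\n']) 0).foldl (fun acc p =>
        if p.1 == 0 then acc ++ [p.2]
        else if PySem.Chars.strip p.2 == ([] : List Char) then acc ++ [p.2]
        else acc ++ [List.replicate margin.toNat ' ' ++ p.2]) []))
    = pvRend (List.replicate margin.toNat ' ') (pvSplitNL cs) := by
  rw [pv_splitOn_eq]
  have hfun : (fun (acc : List (List Char)) (p : Int × List Char) =>
        if p.1 == 0 then acc ++ [p.2]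
        else if PySem.Chars.strip p.2 == ([] : List Char) then acc ++ [p.2]
        else acc ++ [List.replicate margin.toNat ' ' ++ p.2])
      = (fun acc p => acc ++
        [if p.1 == 0 then p.2
         else if PySem.Chars.strip p.2 == ([] : List Char) then p.2
         else List.replicate margin.toNat ' ' ++ p.2]) := by
    funext acc p
    split_ifs <;> rfl
  rw [hfun, PySem.List.foldl_append_eq_flatMap, List.nil_append]
  have hmap : ∀ (l : List (Int × List Char)) (g : Int × List Char → List Char),
      l.flatMap (fun p => [g p]) = l.map g := by
    intro l g
    induction l with
    | nil => rfl
    | cons a l ih2 => simp [ih2]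
  rw [hmap]
  cases hsp : pvSplitNL cs with
  | nil => exact absurd hsp (pvSplitNL_ne_nil cs)
  | cons h t =>
    rw [PySem.List.enumerate_cons, List.map_cons]
    simp only [beq_self_eq_true, if_pos]
    rw [show (0 : Int) + 1 = 1 from rfl]
    rw [pv_enum_map t (List.replicate margin.toNat ' ') 1 (le_refl 1)]
    exact pv_join_eq h t _

-- ===== VERDICT (by name: the statement is the Claim_ definition above) =====
theorem auto_indent_py_spec : Claim_equal_auto_indent_py := by
  intro new_code margin _
  unfold Spec_auto_indent_py
  simp only [auto_indent_py, auto_indent_py_alt]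
  rw [List.foldl_reverse]
  rw [pv_scan_eq (PySem.List.pyRepeat [' '] margin) new_code.toList]
  simp only [PySem.List.pyRepeat_singleton, List.reverse_replicate]
  by_cases h : new_code = ""
  · subst h
    simp only [beq_self_eq_true, if_pos]
    rfl
  · have hbeq : (new_code == "") = false := by simp [h]
    rw [hbeq]
    simp only [Bool.false_eq_true, if_false]
    exact congrArg String.ofList (pv_A_eq new_code.toList margin)
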